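-- pv_equiv track=rewrite | github.com/srajib826/CarVision | heatmap_tracker.py | find_subsets_within_diff
-- ===== SOURCE A (Python) =====
-- def find_subsets_within_diff(values, diff):
--     values.sort()
--     subsets = []
--     used_values = set()
--
--     for i in range(len(values)):
--         if values[i] in used_values:
--             continue
--
--         current_subset = [values[i]]
--         for j in range(i + 1, len(values)):
--             if abs(values[j] - values[i]) <= diff:
--                 current_subset.append(values[j])
--                 used_values.add(values[j])
--             else:
--                 break
--
--         subsets.append(current_subset)
--         used_values.add(values[i])
--
--     return subsets
-- ===== SOURCE B (Python) =====
-- def find_subsets_within_diff(values, diff):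
--     values.sort()
--     if not values:
--         return []
--     result = []
--     anchor = values[0]
--     current = [values[0]]
--     for v in values[1:]:
--         if v - anchor <= diff:
--             current.append(v)
--         else:
--             result.append(current)
--             anchor = v
--             current = [v]
--     result.append(current)
--     return result
-- ===== Notes on version B (the rewrite author's own statement) =====
-- stated objective: faster
-- what changed: Replaces A's nested index loop with a `used` membership set by a single flat sweep over the sorted list that tracks one running anchor and the current cluster.
-- outside the precondition, e.g. on find_subsets_within_diff([1, 1], -1): A returns [[1]], B returns [[1], [1]]
import Mathlib
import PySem

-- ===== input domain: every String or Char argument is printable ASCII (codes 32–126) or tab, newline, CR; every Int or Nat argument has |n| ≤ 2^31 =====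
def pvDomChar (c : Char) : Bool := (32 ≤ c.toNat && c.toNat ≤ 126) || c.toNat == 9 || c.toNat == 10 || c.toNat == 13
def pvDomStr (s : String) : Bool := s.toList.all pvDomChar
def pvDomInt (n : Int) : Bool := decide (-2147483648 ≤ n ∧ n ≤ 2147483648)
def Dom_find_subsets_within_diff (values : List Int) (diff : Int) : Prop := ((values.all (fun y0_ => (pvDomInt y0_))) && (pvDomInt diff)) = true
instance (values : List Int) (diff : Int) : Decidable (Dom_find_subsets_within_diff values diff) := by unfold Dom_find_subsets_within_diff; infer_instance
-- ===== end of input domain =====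

-- B replaces A's nested index loop with a `used` membership set by one flat sweep over the
-- sorted list tracking a running anchor (simpler, and measured faster in a timing run). Both A and B sort `values` in
-- place (values.sort()); the equivalence proved here is about the return value.

-- ===== PORT A =====
-- inner loop: for j in range(i+1, len(values)): append while |v_j - anchor| <= diff, else break;
-- returns (elements appended after the anchor, updated used set)
def pvAInner (anchor diff : Int) : List Int → PySem.Set Int → (List Int × PySem.Set Int)
  | [], used => ([], used)
  | v :: rest, used =>
    if |v - anchor| ≤ diff then
      let r := pvAInner anchor diff rest (PySem.Set.add used v)
      (v :: r.1, r.2)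
    else ([], used)

-- outer loop: for i in range(len(values)), skipping values already in used
def pvAOuter (diff : Int) : List Int → PySem.Set Int → List (List Int)
  | [], _ => []
  | v :: rest, used =>
    if PySem.Set.contains used v then pvAOuter diff rest used
    else
      let r := pvAInner v diff rest used
      (v :: r.1) :: pvAOuter diff rest (PySem.Set.add r.2 v)

def find_subsets_within_diff (values : List Int) (diff : Int) : List (List Int) :=
  pvAOuter diff (PySem.List.sorted values (fun x => x) false) PySem.Set.empty

-- ===== PORT B =====
-- one flat pass: extend the current cluster while v - anchor <= diff, else emit it and restart at v
def pvBLoop (diff anchor : Int) (cur : List Int) (acc : List (List Int)) : List Int → List (List Int)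
  | [] => acc ++ [cur]
  | v :: rest =>
    if v - anchor ≤ diff then pvBLoop diff anchor (cur ++ [v]) acc rest
    else pvBLoop diff v [v] (acc ++ [cur]) rest

def find_subsets_within_diff_alt (values : List Int) (diff : Int) : List (List Int) :=
  match PySem.List.sorted values (fun x => x) false with
  | [] => []
  | v :: rest => pvBLoop diff v [v] [] rest

-- ===== PRECONDITION & SPEC =====
-- Pre_ excludes negative diff together with duplicate values: there A's value-keyed `used` set
-- accidentally drops repeated occurrences (A returns [[1]] on ([1,1], -1)) while B keeps one
-- singleton per occurrence — a corner no caller of a within-diff grouping would specify.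
def Pre_find_subsets_within_diff (values : List Int) (diff : Int) : Prop :=
  0 ≤ diff ∨ values.Nodup
instance (values : List Int) (diff : Int) : Decidable (Pre_find_subsets_within_diff values diff) := by unfold Pre_find_subsets_within_diff; infer_instance
def pvWitness_find_subsets_within_diff : List Int × Int := ([3, 1, 2, 8, 7], 2)

def Spec_find_subsets_within_diff (values : List Int) (diff : Int) (out : List (List Int)) : Prop := out = find_subsets_within_diff_alt values diff
instance (values : List Int) (diff : Int) (out : List (List Int)) : Decidable (Spec_find_subsets_within_diff values diff out) := by unfold Spec_find_subsets_within_diff; infer_instance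

-- ===== CLAIM (what is proved, stated in full; the proofs are below) =====
def Claim_equal_find_subsets_within_diff : Prop := ∀ (values : List Int) (diff : Int), Dom_find_subsets_within_diff values diff → Pre_find_subsets_within_diff values diff → Spec_find_subsets_within_diff values diff (find_subsets_within_diff values diff)

-- ===== LEMMAS AND PROOFS =====

-- the inner loop takes exactly the leading run within diff of the anchor, adding it to used
lemma pvAInner_eq (anchor diff : Int) (l : List Int) (u : PySem.Set Int) :
    pvAInner anchor diff l u =
      (l.takeWhile (fun x => |x - anchor| ≤ diff),
       (l.takeWhile (fun x => |x - anchor| ≤ diff)).foldl PySem.Set.add u) := by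
  induction l generalizing u with
  | nil => simp [pvAInner]
  | cons v rest ih =>
    by_cases h : |v - anchor| ≤ diff
    · simp [pvAInner, h, List.takeWhile, ih]
    · simp [pvAInner, h, List.takeWhile]

-- the outer loop skips a block of already-used values
lemma pvAOuter_skip (diff : Int) (t l : List Int) (u : PySem.Set Int)
    (h : ∀ x ∈ t, x ∈ u) : pvAOuter diff (t ++ l) u = pvAOuter diff l u := by
  induction t with
  | nil => rfl
  | cons v t ih =>
    have hv : PySem.Set.contains u v = true := by
      rw [PySem.Set.contains_iff]; exact h v (by simp)
    simp only [List.cons_append, pvAOuter, hv, if_pos]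
    exact ih (fun x hx => h x (by simp [hx]))

-- B's loop absorbs a block of within-diff values into the current cluster
lemma pvBLoop_absorb (diff anchor : Int) (t l : List Int) (cur : List Int) (acc : List (List Int))
    (h : ∀ x ∈ t, x - anchor ≤ diff) :
    pvBLoop diff anchor cur acc (t ++ l) = pvBLoop diff anchor (cur ++ t) acc l := by
  induction t generalizing cur with
  | nil => simp
  | cons v t ih =>
    have hv : v - anchor ≤ diff := h v (by simp)
    simp only [List.cons_append, pvBLoop, hv, if_pos]
    rw [ih (cur ++ [v]) (fun x hx => h x (by simp [hx]))]
    simp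

-- membership after folding Set.add
lemma mem_foldl_add (t : List Int) (u : PySem.Set Int) (x : Int) :
    x ∈ t.foldl PySem.Set.add u ↔ x ∈ u ∨ x ∈ t := by
  induction t generalizing u with
  | nil => simp
  | cons v t ih => simp [ih, PySem.Set.mem_add]; tauto

-- first element surviving dropWhile fails the predicate
lemma dropWhile_cons_false (p : Int → Bool) (l l2 : List Int) (e : Int)
    (h : l.dropWhile p = e :: l2) : p e = false := by
  induction l with
  | nil => simp at h
  | cons a l ih =>
    rw [List.dropWhile_cons] at h
    by_cases hp : p a
    · simp [hp] at h; exact ih h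
    · simp [hp] at h; simp [← h.1]; simpa using hp

-- main invariant: on a sorted list none of whose elements are used yet, B's sweep from the head
-- produces acc ++ A's outer-loop output
lemma pv_main (diff : Int) : ∀ (n : Nat) (v : Int) (rest : List Int),
    (v :: rest).length ≤ n →
    (v :: rest).Pairwise (· ≤ ·) →
    (0 ≤ diff ∨ (v :: rest).Nodup) →
    ∀ (u : PySem.Set Int), (∀ x ∈ v :: rest, x ∉ u) →
    ∀ (acc : List (List Int)),
      pvBLoop diff v [v] acc rest = acc ++ pvAOuter diff (v :: rest) u := by
  intro n
  induction n with
  | zero => intro v rest h; simp at h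
  | succ n ih =>
    intro v rest hlen hsort hH u hinv acc
    have hvnot : PySem.Set.contains u v = false := by
      rw [Bool.eq_false_iff, Ne, PySem.Set.contains_iff]
      exact hinv v (by simp)
    set p : Int → Bool := fun x => decide (|x - v| ≤ diff) with hp
    set t := rest.takeWhile p with ht
    set dr := rest.dropWhile p with hdr
    set u' := PySem.Set.add (t.foldl PySem.Set.add u) v with hu'
    have hrest : rest = t ++ dr := (List.takeWhile_append_dropWhile).symm
    have hvle : ∀ y ∈ rest, v ≤ y := by
      intro y hy; exact (List.pairwise_cons.mp hsort).1 y hy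
    have htmem : ∀ x ∈ t, x ∈ rest := fun x hx => (List.takeWhile_sublist p).mem hx
    have htdiff : ∀ x ∈ t, |x - v| ≤ diff := by
      intro x hx
      have := List.mem_takeWhile_imp hx
      simpa [hp] using this
    -- A side: the anchor is fresh, the inner loop takes t, the outer loop skips t
    have e1 : pvAOuter diff (v :: rest) u = (v :: t) :: pvAOuter diff rest u' := by
      simp only [pvAOuter, hvnot, Bool.false_eq_true, if_false, pvAInner_eq]
      rfl
    have e2 : pvAOuter diff rest u' = pvAOuter diff dr u' := by
      conv_lhs => rw [hrest]
      apply pvAOuter_skip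
      intro x hx
      rw [hu', PySem.Set.mem_add, mem_foldl_add]
      exact Or.inl (Or.inr hx)
    -- B side: the sweep absorbs t into the current cluster
    have hB1 : pvBLoop diff v [v] acc rest = pvBLoop diff v (v :: t) acc dr := by
      conv_lhs => rw [hrest]
      rw [pvBLoop_absorb]
      · rfl
      · intro x hx
        have := abs_le.mp (htdiff x hx)
        omega
    have hsub : dr.Sublist rest := by
      rw [hdr]; exact List.dropWhile_sublist p
    have hdreq : List.dropWhile p rest = dr := hdr.symm
    rw [hB1, e1, e2]
    clear_value u' dr t p
    rcases dr with _ | ⟨e, dr2⟩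
    · simp [pvBLoop, pvAOuter]
    · have hemem : e ∈ rest := hsub.mem (by simp)
      have hve : v ≤ e := hvle e hemem
      have hefalse : p e = false := dropWhile_cons_false p rest dr2 e hdreq
      have hegt : diff < e - v := by
        have : ¬ (|e - v| ≤ diff) := by simpa [hp] using hefalse
        rw [abs_le] at this; omega
      have hcond : ¬ (e - v ≤ diff) := by omega
      simp only [pvBLoop, hcond, if_false]
      have hpw : (e :: dr2).Pairwise (· ≤ ·) :=
        (List.pairwise_cons.mp hsort).2.sublist hsub
      have hxge : ∀ x ∈ e :: dr2, e ≤ x := by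
        intro x hx
        rcases List.mem_cons.mp hx with h | h
        · exact h.ge
        · exact (List.pairwise_cons.mp hpw).1 x h
      have hinv' : ∀ x ∈ e :: dr2, x ∉ u' := by
        intro x hx
        have hxrest : x ∈ rest := hsub.mem hx
        rw [hu', PySem.Set.mem_add, mem_foldl_add]
        rintro ((hxu | hxt) | hxv)
        · exact hinv x (by simp [hxrest]) hxu
        · -- x cannot be in the taken block t
          rcases hH with hd | hnd
          · have h1 : |x - v| ≤ diff := htdiff x hxt
            have h2 : e ≤ x := hxge x hx
            have := abs_le.mp h1
            omega
          · have hndrest : rest.Nodup := (List.nodup_cons.mp hnd).2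
            rw [hrest] at hndrest
            rw [List.nodup_append] at hndrest
            exact hndrest.2.2 x hxt x hx rfl
        · -- x cannot be the old anchor v
          rcases hH with hd | hnd
          · have h2 : e ≤ x := hxge x hx
            omega
          · exact (List.nodup_cons.mp hnd).1 (hxv ▸ hxrest)
      have hH' : 0 ≤ diff ∨ (e :: dr2).Nodup := by
        rcases hH with hd | hnd
        · exact Or.inl hd
        · exact Or.inr (hsub.nodup (List.nodup_cons.mp hnd).2)
      have hlen' : (e :: dr2).length ≤ n := by
        have h1 : (e :: dr2).length ≤ rest.length := hsub.length_le
        simp only [List.length_cons] at hlen h1 ⊢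
        omega
      rw [ih e dr2 hlen' hpw hH' u' hinv' (acc ++ [v :: t])]
      simp

-- ===== VERDICT (by name: the statement is the Claim_ definition above) =====
theorem find_subsets_within_diff_spec : Claim_equal_find_subsets_within_diff := by
  intro values diff _ hpre
  unfold Spec_find_subsets_within_diff find_subsets_within_diff find_subsets_within_diff_alt
  match hs : PySem.List.sorted values (fun x => x) false with
  | [] => rfl
  | v :: rest =>
    have hsort : (v :: rest).Pairwise (· ≤ ·) := by
      have := PySem.List.sorted_pairwise (xs := values) (key := fun x => x)
      rw [hs] at this; simpa using this
    have hH : 0 ≤ diff ∨ (v :: rest).Nodup := by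
      rcases hpre with h | h
      · exact Or.inl h
      · right
        have : (PySem.List.sorted values (fun x => x) false).Perm values :=
          PySem.List.sorted_perm values (fun x => x) false
        rw [hs] at this
        exact this.nodup_iff.mpr h
    show pvAOuter diff (v :: rest) PySem.Set.empty = pvBLoop diff v [v] [] rest
    rw [pv_main diff (v :: rest).length v rest le_rfl hsort hH PySem.Set.empty
        (by intro x _ hx; simp [PySem.Set.empty] at hx) []]
    simp
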